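-- pv_equiv track=rewrite | github.com/EditLelkes/AoC2021 | 5_hydrothermal_vents.py | count_high_risk_coordinates
-- ===== SOURCE A (Python) =====
-- def count_high_risk_coordinates(hydrothermal_vent_coordinates):
--     counts = {}
--     for coordinates in hydrothermal_vent_coordinates:
--         counts[coordinates] = counts.get(coordinates, 0) + 1
--
--     high_risk_coordinates = 0
--     for value in counts.values():
--         if value > 1:
--             high_risk_coordinates += 1
--     return high_risk_coordinates
-- ===== SOURCE B (Python) =====
-- def count_high_risk_coordinates(hydrothermal_vent_coordinates):
--     seen = set()
--     duplicates = set()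
--     for coordinates in hydrothermal_vent_coordinates:
--         if coordinates in seen:
--             duplicates.add(coordinates)
--         else:
--             seen.add(coordinates)
--     return len(duplicates)
-- ===== Notes on version B (the rewrite author's own statement) =====
-- stated objective: simpler
-- what changed: Replaces the two-pass build-a-count-dict-then-scan-its-values approach with a single pass that maintains a 'seen' set and a 'duplicates' set and returns the size of the latter; no counts are ever stored.
import Mathlib
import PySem

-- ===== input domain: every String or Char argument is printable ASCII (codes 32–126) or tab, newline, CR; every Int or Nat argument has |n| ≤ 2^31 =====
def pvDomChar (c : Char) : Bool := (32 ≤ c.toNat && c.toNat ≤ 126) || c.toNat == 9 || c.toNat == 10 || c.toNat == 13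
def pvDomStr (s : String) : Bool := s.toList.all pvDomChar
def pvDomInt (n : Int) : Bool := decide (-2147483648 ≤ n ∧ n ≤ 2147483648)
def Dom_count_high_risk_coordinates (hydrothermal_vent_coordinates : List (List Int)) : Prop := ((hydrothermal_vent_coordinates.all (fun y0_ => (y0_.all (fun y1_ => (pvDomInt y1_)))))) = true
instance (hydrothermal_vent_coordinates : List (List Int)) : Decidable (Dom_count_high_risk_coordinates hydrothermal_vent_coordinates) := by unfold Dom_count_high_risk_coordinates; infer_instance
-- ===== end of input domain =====

-- B replaces A's two passes (build a coordinate→count dict, then scan its values for counts > 1)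
-- by a single pass keeping a 'seen' set and a 'duplicates' set; objective: simpler.

-- ===== PORT A =====
def count_high_risk_coordinates (hydrothermal_vent_coordinates : List (List Int)) : Int :=
  (hydrothermal_vent_coordinates.foldl
      (fun (d : PySem.Dict (List Int) Int) coordinates =>
        d.insert coordinates (d.getD coordinates 0 + 1)) PySem.Dict.empty).values.foldl
    (fun high_risk_coordinates value =>
      if value > 1 then high_risk_coordinates + 1 else high_risk_coordinates) 0

-- ===== PORT B =====
def count_high_risk_coordinates_alt (hydrothermal_vent_coordinates : List (List Int)) : Int :=
  PySem.Set.len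
    (hydrothermal_vent_coordinates.foldl
      (fun (st : PySem.Set (List Int) × PySem.Set (List Int)) coordinates =>
        if st.1.contains coordinates then (st.1, PySem.Set.add st.2 coordinates)
        else (PySem.Set.add st.1 coordinates, st.2))
      (PySem.Set.empty, PySem.Set.empty)).2

-- ===== PRECONDITION & SPEC =====
def Spec_count_high_risk_coordinates (hydrothermal_vent_coordinates : List (List Int)) (out : Int) : Prop := out = count_high_risk_coordinates_alt hydrothermal_vent_coordinates
instance (hydrothermal_vent_coordinates : List (List Int)) (out : Int) : Decidable (Spec_count_high_risk_coordinates hydrothermal_vent_coordinates out) := by unfold Spec_count_high_risk_coordinates; infer_instance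

-- ===== CLAIM (what is proved, stated in full; the proofs are below) =====
def Claim_equal_count_high_risk_coordinates : Prop := ∀ (hydrothermal_vent_coordinates : List (List Int)), Dom_count_high_risk_coordinates hydrothermal_vent_coordinates → Spec_count_high_risk_coordinates hydrothermal_vent_coordinates (count_high_risk_coordinates hydrothermal_vent_coordinates)

-- ===== LEMMAS AND PROOFS =====

-- Invariant of B's single fold, started from any nodup (seen, dups): the final 'duplicates'
-- component is nodup and contains exactly the old duplicates, the seen elements that recur in l,
-- and the elements occurring at least twice in l.
theorem pvB_fold_inv (l : List (List Int)) (seen dups : List (List Int))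
    (hs : seen.Nodup) (hd : dups.Nodup) :
    (l.foldl
      (fun (st : PySem.Set (List Int) × PySem.Set (List Int)) c =>
        if st.1.contains c then (st.1, PySem.Set.add st.2 c) else (PySem.Set.add st.1 c, st.2))
      (seen, dups)).2.Nodup ∧
    (∀ x, x ∈ (l.foldl
      (fun (st : PySem.Set (List Int) × PySem.Set (List Int)) c =>
        if st.1.contains c then (st.1, PySem.Set.add st.2 c) else (PySem.Set.add st.1 c, st.2))
      (seen, dups)).2 ↔ x ∈ dups ∨ (x ∈ seen ∧ x ∈ l) ∨ 2 ≤ l.count x) := by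
  induction l generalizing seen dups with
  | nil => simpa using hd
  | cons c l ih =>
    simp only [List.foldl_cons]
    by_cases hc : PySem.Set.contains seen c = true
    · have hmem : c ∈ seen := (PySem.Set.contains_iff _ _).1 hc
      rw [if_pos hc]
      obtain ⟨h1, h2⟩ := ih seen (PySem.Set.add dups c) hs (PySem.Set.nodup_add _ _ hd)
      refine ⟨h1, fun x => ?_⟩
      rw [h2 x]
      by_cases hxc : x = c
      · subst hxc
        simp [PySem.Set.mem_add, hmem]
      · have hcnt : (c :: l).count x = l.count x := by
          rw [List.count_cons]; simp [Ne.symm hxc]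
        rw [hcnt]
        simp [PySem.Set.mem_add, hxc]
    · have hmem : c ∉ seen := fun h => hc ((PySem.Set.contains_iff _ _).2 h)
      rw [if_neg hc]
      obtain ⟨h1, h2⟩ := ih (PySem.Set.add seen c) dups (PySem.Set.nodup_add _ _ hs) hd
      refine ⟨h1, fun x => ?_⟩
      rw [h2 x]
      by_cases hxc : x = c
      · subst hxc
        have hcnt : (x :: l).count x = l.count x + 1 := by
          rw [List.count_cons]; simp
        rw [hcnt]
        simp only [PySem.Set.mem_add, List.mem_cons]
        constructor
        · rintro (h | ⟨_, h⟩ | h)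
          · exact Or.inl h
          · refine Or.inr (Or.inr ?_)
            have := List.count_pos_iff.2 h
            omega
          · refine Or.inr (Or.inr ?_); omega
        · rintro (h | ⟨h, _⟩ | h)
          · exact Or.inl h
          · exact absurd h hmem
          · have : x ∈ l := List.count_pos_iff.1 (by omega)
            exact Or.inr (Or.inl ⟨Or.inr trivial, this⟩)
      · have hcnt : (c :: l).count x = l.count x := by
          rw [List.count_cons]; simp [Ne.symm hxc]
        rw [hcnt]
        simp only [PySem.Set.mem_add, List.mem_cons]
        constructor
        · rintro (h | ⟨(h | h), h'⟩ | h)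
          · exact Or.inl h
          · exact Or.inr (Or.inl ⟨h, Or.inr h'⟩)
          · exact absurd h hxc
          · exact Or.inr (Or.inr h)
        · rintro (h | ⟨h, (h' | h')⟩ | h)
          · exact Or.inl h
          · exact absurd h' hxc
          · exact Or.inr (Or.inl ⟨Or.inl h, h'⟩)
          · exact Or.inr (Or.inr h)

-- ===== VERDICT (by name: the statement is the Claim_ definition above) =====
theorem count_high_risk_coordinates_spec : Claim_equal_count_high_risk_coordinates := by
  intro l _
  unfold Spec_count_high_risk_coordinates count_high_risk_coordinates count_high_risk_coordinates_alt
  rw [show (l.foldl (fun (d : PySem.Dict (List Int) Int) c => d.insert c (d.getD c 0 + 1)) PySem.Dict.empty)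
        = PySem.Dict.counter l from PySem.Dict.foldl_insert_getD_add_one_eq_counter l]
  have hval : (PySem.Dict.counter l).values
      = (PySem.Set.ofList l).map (fun k => (l.count k : Int)) := by
    show ((PySem.Dict.counter l).items.map (·.2))
        = (PySem.Set.ofList l).map (fun k => (l.count k : Int))
    rw [PySem.Dict.items_counter]
    simp [List.map_map, Function.comp]
  rw [hval, PySem.List.foldl_ite_add_one]
  have hB := pvB_fold_inv l [] [] (List.nodup_nil) (List.nodup_nil)
  set dupsF := (l.foldl
      (fun (st : PySem.Set (List Int) × PySem.Set (List Int)) c =>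
        if st.1.contains c then (st.1, PySem.Set.add st.2 c) else (PySem.Set.add st.1 c, st.2))
      (PySem.Set.empty, PySem.Set.empty)).2 with hdef
  have hmem : ∀ x, x ∈ dupsF ↔ 2 ≤ l.count x := by
    intro x
    have h := hB.2 x
    simp only [List.not_mem_nil, false_and, false_or] at h
    exact h
  have hnd : dupsF.Nodup := hB.1
  have hfilter :
      (((PySem.Set.ofList l).map (fun k => (l.count k : Int))).countP (fun v => decide (v > 1)) : Int)
      = (((PySem.Set.ofList l).filter (fun k => decide (2 ≤ l.count k))).length : Int) := by
    rw [List.countP_map, List.countP_eq_length_filter]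
    congr 2
    apply List.filter_congr
    intro x _
    simp only [Function.comp_apply, decide_eq_decide]
    omega
  have hperm : ((PySem.Set.ofList l).filter (fun k => decide (2 ≤ l.count k))).Perm dupsF := by
    rw [List.perm_ext_iff_of_nodup (List.Nodup.filter _ (PySem.Set.nodup_ofList l)) hnd]
    intro a
    rw [hmem a]
    simp only [List.mem_filter, PySem.Set.mem_ofList, decide_eq_true_eq]
    constructor
    · rintro ⟨_, h⟩; exact h
    · intro h
      refine ⟨List.count_pos_iff.1 (by omega), h⟩
  rw [hfilter, hperm.length_eq]
  simp [PySem.Set.len]
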